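-- pv_equiv track=rewrite | github.com/EDGAhab/AirMettleTemp | utils.py | get_length_of_chunks
-- ===== SOURCE A (Python) =====
-- def get_length_of_chunks(chunk_sample_table, num_of_chunk):
--
--     sample_list_in_each_chunk = []
--     start_ptr = 0
--     for i in range(len(chunk_sample_table)):
--         n = chunk_sample_table[i][0]-1
--         if i+1 < len(chunk_sample_table):
--             nxt = chunk_sample_table[i+1][0]-1
--         else:
--             nxt = num_of_chunk
--         for _ in range(nxt-n):
--             sample_list_in_each_chunk.append(
--                 [sample_idx+start_ptr for sample_idx in range(chunk_sample_table[i][1])])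
--             start_ptr += chunk_sample_table[i][1]
--
--     return sample_list_in_each_chunk
-- ===== SOURCE B (Python) =====
-- def _groups(table, num_of_chunk):
--     # recursive run-length encoding: [(repetitions, sample_count), ...]
--     if not table:
--         return []
--     (first, cnt), rest = table[0], table[1:]
--     nxt = rest[0][0] - 1 if rest else num_of_chunk
--     return [(max(nxt - first + 1, 0), cnt)] + _groups(rest, num_of_chunk)
--
--
-- def get_length_of_chunks(chunk_sample_table, num_of_chunk):
--     groups = _groups(chunk_sample_table, num_of_chunk)
--     end = sum(r * c for r, c in groups)      # closed-form final pointer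
--     out = []
--     for r, c in reversed(groups):            # emit blocks back-to-front
--         for _ in range(r):
--             end -= c
--             out.append(list(range(end, end + c)))
--     out.reverse()
--     return out
-- ===== Notes on version B (the rewrite author's own statement) =====
-- stated objective: alternative
-- what changed: Instead of A's forward nested index loop with a running start pointer, B recursively run-length-encodes the table into (repetitions, count) groups, computes the final pointer in closed form as sum(r*c), and emits the blocks back-to-front from that end pointer, reversing the output once at the end.
import Mathlib
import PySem

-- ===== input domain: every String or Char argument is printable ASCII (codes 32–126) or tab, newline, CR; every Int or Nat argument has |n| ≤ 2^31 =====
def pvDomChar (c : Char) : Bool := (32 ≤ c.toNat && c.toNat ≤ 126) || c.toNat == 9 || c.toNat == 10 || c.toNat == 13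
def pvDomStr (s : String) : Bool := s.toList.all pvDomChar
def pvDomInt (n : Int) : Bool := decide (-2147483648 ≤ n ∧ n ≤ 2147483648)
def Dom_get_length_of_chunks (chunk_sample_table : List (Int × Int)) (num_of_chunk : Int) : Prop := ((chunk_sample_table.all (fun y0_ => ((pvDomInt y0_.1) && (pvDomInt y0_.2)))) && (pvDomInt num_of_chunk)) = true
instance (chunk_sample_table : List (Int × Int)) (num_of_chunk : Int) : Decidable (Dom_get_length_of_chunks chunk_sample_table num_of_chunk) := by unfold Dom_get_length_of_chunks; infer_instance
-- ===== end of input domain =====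

-- B replaces A's forward nested index loop and running start pointer by a recursive
-- run-length encoding of the table, a closed-form total (sum of products), and
-- back-to-front emission from the end pointer (objective: alternative algorithm).

-- ===== PORT A =====
-- for i in range(len(table)): inner 'for _ in range(nxt-n)' appending the comprehension
def get_length_of_chunks (chunk_sample_table : List (Int × Int)) (num_of_chunk : Int) : List (List Int) :=
  ((List.range chunk_sample_table.length).foldl
    (fun (st : List (List Int) × Int) (i : Nat) =>
      -- n = table[i][0]-1; nxt = table[i+1][0]-1 or num_of_chunk; inner loop runs (nxt-n) times
      (List.range ((if i + 1 < chunk_sample_table.length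
                    then (chunk_sample_table.getD (i + 1) (0, 0)).1 - 1
                    else num_of_chunk) - ((chunk_sample_table.getD i (0, 0)).1 - 1)).toNat).foldl
        (fun (st2 : List (List Int) × Int) _ =>
          (st2.1 ++ [(PySem.List.pyRange 0 (chunk_sample_table.getD i (0, 0)).2 1).map (fun j => j + st2.2)],
           st2.2 + (chunk_sample_table.getD i (0, 0)).2))
        st)
    ([], 0)).1

-- ===== PORT B =====
-- nxt = rest[0][0] - 1 if rest else num_of_chunk
def glcNext (rest : List (Int × Int)) (num : Int) : Int :=
  match rest with | [] => num | (f2, _) :: _ => f2 - 1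

-- _groups: recursive run-length encoding [(repetitions, sample_count), ...]
def glcGroups : List (Int × Int) → Int → List (Int × Int)
  | [], _ => []
  | (f, c) :: rest, num =>
      (max (glcNext rest num - f + 1) 0, c) :: glcGroups rest num

-- end = sum(r*c); emit blocks back-to-front over reversed(groups); out.reverse()
def get_length_of_chunks_alt (chunk_sample_table : List (Int × Int)) (num_of_chunk : Int) : List (List Int) :=
  let groups := glcGroups chunk_sample_table num_of_chunk
  ((groups.reverse.foldl
      (fun (st : List (List Int) × Int) (rc : Int × Int) =>
        (List.range rc.1.toNat).foldl
          (fun (st2 : List (List Int) × Int) _ =>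
            (st2.1 ++ [PySem.List.pyRange (st2.2 - rc.2) (st2.2 - rc.2 + rc.2) 1], st2.2 - rc.2))
          st)
      ([], groups.foldl (fun a (p : Int × Int) => a + p.1 * p.2) 0)).1).reverse

-- ===== PRECONDITION & SPEC =====
def Spec_get_length_of_chunks (chunk_sample_table : List (Int × Int)) (num_of_chunk : Int) (out : List (List Int)) : Prop := out = get_length_of_chunks_alt chunk_sample_table num_of_chunk
instance (chunk_sample_table : List (Int × Int)) (num_of_chunk : Int) (out : List (List Int)) : Decidable (Spec_get_length_of_chunks chunk_sample_table num_of_chunk out) := by unfold Spec_get_length_of_chunks; infer_instance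

-- ===== CLAIM (what is proved, stated in full; the proofs are below) =====
def Claim_equal_get_length_of_chunks : Prop := ∀ (chunk_sample_table : List (Int × Int)) (num_of_chunk : Int), Dom_get_length_of_chunks chunk_sample_table num_of_chunk → Spec_get_length_of_chunks chunk_sample_table num_of_chunk (get_length_of_chunks chunk_sample_table num_of_chunk)

-- ===== LEMMAS AND PROOFS =====

-- forward emitting step (A's inner loop, flattened)
def pvStepB (st : List (List Int) × Int) (size : Int) : List (List Int) × Int :=
  (st.1 ++ [PySem.List.pyRange st.2 (st.2 + size) 1], st.2 + size)

-- backward emitting step (B's inner loop)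
def pvBack (st : List (List Int) × Int) (size : Int) : List (List Int) × Int :=
  (st.1 ++ [PySem.List.pyRange (st.2 - size) (st.2 - size + size) 1], st.2 - size)

-- structural per-chunk size list
def pvSizes : List (Int × Int) → Int → List Int
  | [], _ => []
  | (f, c) :: rest, num =>
      let nxt := match rest with
        | [] => num
        | (f2, _) :: _ => f2 - 1
      List.replicate (nxt - (f - 1)).toNat c ++ pvSizes rest num

-- canonical forward emission
def pvF : List Int → Int → List (List Int)
  | [], _ => []
  | c :: L, s => PySem.List.pyRange s (s + c) 1 :: pvF L (s + c)

def pvRep (rc : Int × Int) : List Int := List.replicate rc.1.toNat rc.2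

theorem pv_innerA_eq (c s : Int) :
    (PySem.List.pyRange 0 c 1).map (fun j => j + s) = PySem.List.pyRange s (s + c) 1 := by
  rw [PySem.List.pyRange_one, PySem.List.pyRange_one]
  simp [List.map_map, Function.comp, add_comm]

theorem pv_inner_fold (k : Nat) (c : Int) (st : List (List Int) × Int) :
    (List.range k).foldl
      (fun (st2 : List (List Int) × Int) _ =>
        (st2.1 ++ [(PySem.List.pyRange 0 c 1).map (fun j => j + st2.2)], st2.2 + c)) st
    = (List.replicate k c).foldl pvStepB st := by
  induction k generalizing st with
  | zero => rfl
  | succ k ih =>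
      rw [List.range_succ, List.replicate_succ', List.foldl_append, List.foldl_append, ih]
      simp [pvStepB, pv_innerA_eq]

theorem pv_A_gen (num : Int) :
    ∀ (rest pre : List (Int × Int)) (st : List (List Int) × Int),
    (List.range' pre.length rest.length).foldl
      (fun (st : List (List Int) × Int) (i : Nat) =>
        (List.range ((if i + 1 < (pre ++ rest).length
                      then ((pre ++ rest).getD (i + 1) (0, 0)).1 - 1
                      else num) - (((pre ++ rest).getD i (0, 0)).1 - 1)).toNat).foldl
          (fun (st2 : List (List Int) × Int) _ =>
            (st2.1 ++ [(PySem.List.pyRange 0 ((pre ++ rest).getD i (0, 0)).2 1).map (fun j => j + st2.2)],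
             st2.2 + ((pre ++ rest).getD i (0, 0)).2))
          st)
      st
    = (pvSizes rest num).foldl pvStepB st := by
  intro rest
  induction rest with
  | nil => intro pre st; simp [pvSizes]
  | cons hd tl ih =>
      intro pre st
      obtain ⟨f, c⟩ := hd
      simp only [List.length_cons]
      rw [List.range'_succ, List.foldl_cons]
      have hget : (pre ++ (f, c) :: tl).getD pre.length (0, 0) = (f, c) := by simp
      cases tl with
      | nil =>
          have hc : ¬ (pre.length + 1 < (pre ++ [(f, c)]).length) := by simp
          simp only [hget, hc, List.length_nil, List.range'_zero, List.foldl_nil]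
          rw [pv_inner_fold]
          simp [pvSizes]
      | cons hd2 tl2 =>
          obtain ⟨f2, c2⟩ := hd2
          have hc : pre.length + 1 < (pre ++ (f, c) :: (f2, c2) :: tl2).length := by
            simp
          have hget2 : (pre ++ (f, c) :: (f2, c2) :: tl2).getD (pre.length + 1) (0, 0) = (f2, c2) := by
            have h1 : pre ++ (f, c) :: (f2, c2) :: tl2 = (pre ++ [(f, c)]) ++ (f2, c2) :: tl2 := by
              simp
            have h2 : (pre ++ [(f, c)]).length = pre.length + 1 := by simp
            rw [h1, ← h2]
            simp
          simp only [hget, hget2, hc, if_pos]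
          rw [pv_inner_fold]
          have ih' := ih (pre ++ [(f, c)])
            (st := (List.replicate (f2 - 1 - (f - 1)).toNat c).foldl pvStepB st)
          simp only [List.append_assoc, List.cons_append, List.nil_append, List.length_append,
            List.length_cons, List.length_nil, Nat.add_comm, Nat.add_left_comm] at ih' ⊢
          rw [ih']
          simp [pvSizes, List.foldl_append]

-- forward fold characterised by pvF
theorem pv_fwd (L : List Int) : ∀ (acc : List (List Int)) (s : Int),
    L.foldl pvStepB (acc, s) = (acc ++ pvF L s, s + L.sum) := by
  induction L with
  | nil => intro acc s; simp [pvF]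
  | cons c L ih =>
      intro acc s
      rw [List.foldl_cons]
      show L.foldl pvStepB (acc ++ [PySem.List.pyRange s (s + c) 1], s + c) = _
      rw [ih]
      simp [pvF, add_assoc]

-- a fold over range k with a constant element equals a fold over replicate k c
theorem pv_range_const {α : Type} (f : α → Int → α) (c : Int) (k : Nat) (st : α) :
    (List.range k).foldl (fun s _ => f s c) st = (List.replicate k c).foldl f st := by
  induction k with
  | zero => rfl
  | succ k ih =>
      rw [List.range_succ, List.replicate_succ', List.foldl_append, List.foldl_append, ih]
      rfl

-- a fold of per-group replicate folds is a fold over the flattened size list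
theorem pv_flat_fold (G : List (Int × Int)) : ∀ (st : List (List Int) × Int),
    G.foldl (fun st rc => (pvRep rc).foldl pvBack st) st
      = (G.flatMap pvRep).foldl pvBack st := by
  induction G with
  | nil => intro st; rfl
  | cons rc G ih => intro st; rw [List.foldl_cons, List.flatMap_cons, List.foldl_append, ih]

-- flatMap of self-reversed pieces commutes with reverse
theorem pv_flat_rev (G : List (Int × Int)) :
    G.reverse.flatMap pvRep = (G.flatMap pvRep).reverse := by
  induction G with
  | nil => rfl
  | cons rc G ih =>
      rw [List.reverse_cons, List.flatMap_append, List.flatMap_cons, ih]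
      simp [pvRep, List.reverse_replicate]

-- backward fold from the total produces pvF reversed
theorem pv_bwd (L : List Int) : ∀ (acc : List (List Int)) (s : Int),
    L.reverse.foldl pvBack (acc, s + L.sum) = (acc ++ (pvF L s).reverse, s) := by
  induction L with
  | nil => intro acc s; simp [pvF]
  | cons c L ih =>
      intro acc s
      rw [List.reverse_cons, List.foldl_append]
      have hs : s + (c :: L).sum = (s + c) + L.sum := by
        simp [List.sum_cons]; ring
      rw [hs, ih acc (s + c)]
      simp [pvF, pvBack]

-- unfolding pvSizes through glcNext
theorem pvSizes_cons (f c : Int) (rest : List (Int × Int)) (num : Int) :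
    pvSizes ((f, c) :: rest) num
      = List.replicate (glcNext rest num - (f - 1)).toNat c ++ pvSizes rest num := by
  cases rest <;> rfl

-- B's size list is the structural one
theorem pv_groups_sizes (num : Int) : ∀ (t : List (Int × Int)),
    (glcGroups t num).flatMap pvRep = pvSizes t num := by
  intro t
  induction t with
  | nil => rfl
  | cons hd tl ih =>
      obtain ⟨f, c⟩ := hd
      simp only [glcGroups, List.flatMap_cons]
      rw [ih, pvSizes_cons]
      congr 2
      simp only [pvRep]
      congr 1
      omega

-- B's closed-form total is the sum of the size list
theorem pv_foldl_sum (G : List (Int × Int)) : ∀ (a : Int),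
    G.foldl (fun a (p : Int × Int) => a + p.1 * p.2) a = a + (G.map (fun p => p.1 * p.2)).sum := by
  induction G with
  | nil => intro a; simp
  | cons p G ih => intro a; rw [List.foldl_cons, ih]; simp [add_assoc]

theorem pv_groups_total (num : Int) : ∀ (t : List (Int × Int)),
    ((glcGroups t num).map (fun p => p.1 * p.2)).sum = ((glcGroups t num).flatMap pvRep).sum := by
  intro t
  induction t with
  | nil => rfl
  | cons hd tl ih =>
      obtain ⟨f, c⟩ := hd
      simp only [glcGroups, List.map_cons, List.flatMap_cons]
      rw [List.sum_cons, List.sum_append, ih]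
      have hnn : (0 : Int) ≤ max (glcNext tl num - f + 1) 0 := le_max_right _ 0
      simp only [pvRep, List.sum_replicate, nsmul_eq_mul, Int.toNat_of_nonneg hnn]

-- ===== VERDICT (by name: the statement is the Claim_ definition above) =====
theorem get_length_of_chunks_spec : Claim_equal_get_length_of_chunks := by
  intro t num _
  unfold Spec_get_length_of_chunks get_length_of_chunks get_length_of_chunks_alt
  -- A side
  have hA := pv_A_gen num t [] ([], 0)
  simp only [List.nil_append, List.length_nil] at hA
  rw [List.range_eq_range', hA, pv_fwd]
  -- B side
  show _ = ((((glcGroups t num).reverse.foldl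
      (fun st rc => (List.range rc.1.toNat).foldl (fun st2 _ => pvBack st2 rc.2) st)
      ([], (glcGroups t num).foldl (fun a p => a + p.1 * p.2) 0)).1).reverse)
  have hconst : (fun (st : List (List Int) × Int) (rc : Int × Int) =>
      (List.range rc.1.toNat).foldl (fun st2 _ => pvBack st2 rc.2) st)
      = fun st rc => (pvRep rc).foldl pvBack st := by
    funext st rc
    rw [pv_range_const pvBack rc.2 rc.1.toNat st]
    rfl
  rw [hconst, pv_flat_fold, pv_flat_rev, pv_groups_sizes,
      pv_foldl_sum, pv_groups_total num t, pv_groups_sizes, zero_add]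
  have hb := pv_bwd (pvSizes t num) [] 0
  rw [zero_add] at hb
  rw [hb]
  simp
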